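-- pv_equiv track=rewrite | github.com/orenfromberg/aoc2022 | day15/part2/main3.py | is_within_search_space
-- ===== SOURCE A (Python) =====
-- def is_within_boundaries(x,y,m):
--     return x >= 0  and x <= m and y >= 0 and y <= m
--
-- def is_within_search_space(row,m):
--     sensor,_,d = row
--     sensor_x, sensor_y = sensor
--     for i in range(d+1):
--         _a = sensor_x+i
--         _b = sensor_x-i
--         _c = sensor_y+(d-i)
--         _d = sensor_y-(d-i)
--         if is_within_boundaries(_a,_c,m) and is_within_boundaries(_a,_d,m)  and is_within_boundaries(_b,_c,m) and is_within_boundaries(_b,_d,m):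
--             return True
--     return False
-- ===== SOURCE B (Python) =====
-- def is_within_search_space(row, m):
--     (sx, sy), _, d = row
--     lo = max(0, d - sy, d - (m - sy))
--     hi = min(d, sx, m - sx)
--     return d >= 0 and lo <= hi
-- ===== Notes on version B (the rewrite author's own statement) =====
-- stated objective: faster
-- what changed: Replaced A's O(d) scan over the diamond's top edge by solving the four corner inequalities for i and testing non-emptiness of the resulting interval in O(1).
import Mathlib
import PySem

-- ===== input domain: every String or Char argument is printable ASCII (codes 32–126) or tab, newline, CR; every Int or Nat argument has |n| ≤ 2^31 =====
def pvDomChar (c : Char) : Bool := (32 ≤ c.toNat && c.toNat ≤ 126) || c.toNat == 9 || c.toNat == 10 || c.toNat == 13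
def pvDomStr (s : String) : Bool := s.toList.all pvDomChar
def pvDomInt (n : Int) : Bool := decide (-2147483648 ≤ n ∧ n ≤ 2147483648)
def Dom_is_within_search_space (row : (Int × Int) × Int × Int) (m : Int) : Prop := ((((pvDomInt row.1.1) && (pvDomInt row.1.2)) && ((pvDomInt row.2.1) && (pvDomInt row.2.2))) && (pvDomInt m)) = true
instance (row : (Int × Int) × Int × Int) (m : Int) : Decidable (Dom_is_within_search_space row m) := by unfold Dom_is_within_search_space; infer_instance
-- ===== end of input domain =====

-- B replaces A's O(d) scan over the diamond's top edge by an O(1) non-emptiness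
-- test of the interval of admissible i derived from the corner inequalities.

-- ===== PORT A =====
def is_within_boundaries (x y m : Int) : Bool :=
  decide (x ≥ 0) && decide (x ≤ m) && decide (y ≥ 0) && decide (y ≤ m)

-- the `for i in range(d+1): … return True` loop with early return
def pvALoop (sx sy d m : Int) : List Int → Bool
  | [] => false
  | i :: rest =>
    let _a := sx + i
    let _b := sx - i
    let _c := sy + (d - i)
    let _d := sy - (d - i)
    if is_within_boundaries _a _c m && is_within_boundaries _a _d m
        && is_within_boundaries _b _c m && is_within_boundaries _b _d m then true
    else pvALoop sx sy d m rest

def is_within_search_space (row : (Int × Int) × Int × Int) (m : Int) : Bool :=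
  pvALoop row.1.1 row.1.2 row.2.2 m (PySem.List.pyRange 0 (row.2.2 + 1) 1)

-- ===== PORT B =====
def is_within_search_space_alt (row : (Int × Int) × Int × Int) (m : Int) : Bool :=
  let sx := row.1.1
  let sy := row.1.2
  let d := row.2.2
  let lo := max 0 (max (d - sy) (d - (m - sy)))
  let hi := min d (min sx (m - sx))
  decide (d ≥ 0) && decide (lo ≤ hi)

-- ===== PRECONDITION & SPEC =====
def Spec_is_within_search_space (row : (Int × Int) × Int × Int) (m : Int) (out : Bool) : Prop := out = is_within_search_space_alt row m
instance (row : (Int × Int) × Int × Int) (m : Int) (out : Bool) : Decidable (Spec_is_within_search_space row m out) := by unfold Spec_is_within_search_space; infer_instance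

-- ===== CLAIM (what is proved, stated in full; the proofs are below) =====
def Claim_equal_is_within_search_space : Prop := ∀ (row : (Int × Int) × Int × Int) (m : Int), Dom_is_within_search_space row m → Spec_is_within_search_space row m (is_within_search_space row m)

-- ===== LEMMAS AND PROOFS =====

-- A's early-return loop is List.any of the corner condition
theorem pvALoop_eq_any (sx sy d m : Int) (L : List Int) :
    pvALoop sx sy d m L =
      L.any (fun i =>
        is_within_boundaries (sx + i) (sy + (d - i)) m
          && is_within_boundaries (sx + i) (sy - (d - i)) m
          && is_within_boundaries (sx - i) (sy + (d - i)) m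
          && is_within_boundaries (sx - i) (sy - (d - i)) m) := by
  induction L with
  | nil => rfl
  | cons i rest ih =>
    simp only [pvALoop, List.any_cons, ih]
    split_ifs with h
    · simp [h]
    · simp [h]

-- ===== VERDICT (by name: the statement is the Claim_ definition above) =====
theorem is_within_search_space_spec : Claim_equal_is_within_search_space := by
  intro row m _
  obtain ⟨⟨sx, sy⟩, b, d⟩ := row
  unfold Spec_is_within_search_space is_within_search_space is_within_search_space_alt
  simp only [pvALoop_eq_any]
  rw [Bool.eq_iff_iff]
  simp only [List.any_eq_true, PySem.List.mem_pyRange_one, is_within_boundaries,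
    Bool.and_eq_true, decide_eq_true_eq]
  constructor
  · rintro ⟨i, ⟨h0, h1⟩, hc⟩
    simp only [ge_iff_le]
    omega
  · intro h
    simp only [ge_iff_le] at h
    refine ⟨max 0 (max (d - sy) (d - (m - sy))), ?_, ?_⟩ <;> omega
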